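-- pv_equiv track=rewrite | github.com/alisterburt/dynamo2emClarity | dynamo2emClarity.py | calculate_subarea_numbers
-- ===== SOURCE A (Python) =====
-- def calculate_subarea_numbers(list_table_idx):
--     nTables = len(list_table_idx)
--     indices = range(0, nTables)
--     subarea_numbers = []
--     subarea_number = 1
--     for idx in indices:
--         current_table_idx = list_table_idx[idx]
--         subarea_numbers.append(subarea_number)
--
--         if idx == indices[-1]:
--             subarea_number += 1
--         elif current_table_idx == list_table_idx[idx + 1]:
--             subarea_number += 1
--         else:
--             subarea_number = 1
--
--     return subarea_numbers
-- ===== SOURCE B (Python) =====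
-- def calculate_subarea_numbers(list_table_idx):
--     result = []
--     n = len(list_table_idx)
--     i = 0
--     while i < n:
--         j = i
--         while j < n and list_table_idx[j] == list_table_idx[i]:
--             j += 1
--         result.extend(range(1, j - i + 1))
--         i = j
--     return result
-- ===== Notes on version B (the rewrite author's own statement) =====
-- stated objective: alternative
-- what changed: A makes one forward pass with next-element lookahead and a counter that resets; B partitions the list into maximal runs of equal values (outer loop over runs, inner numbering 1..run length) and concatenates the numberings.
import Mathlib
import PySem

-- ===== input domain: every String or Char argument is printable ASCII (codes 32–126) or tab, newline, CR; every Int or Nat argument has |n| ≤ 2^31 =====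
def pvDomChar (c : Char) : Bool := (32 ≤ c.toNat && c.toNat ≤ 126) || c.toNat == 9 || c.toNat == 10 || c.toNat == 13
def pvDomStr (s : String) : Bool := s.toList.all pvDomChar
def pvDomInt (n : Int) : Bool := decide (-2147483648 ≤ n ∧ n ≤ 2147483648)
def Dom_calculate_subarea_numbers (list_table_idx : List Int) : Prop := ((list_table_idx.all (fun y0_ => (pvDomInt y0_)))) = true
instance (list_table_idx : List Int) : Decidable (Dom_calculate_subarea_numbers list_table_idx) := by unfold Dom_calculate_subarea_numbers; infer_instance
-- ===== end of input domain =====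

-- B replaces A's single lookahead pass by an outer loop over maximal runs of equal
-- values with an inner numbering 1..run-length (objective: alternative decomposition).

-- ===== PORT A =====
-- loop body of A's for-loop, kept as a helper over the state (subarea_numbers, subarea_number)
def stepA (l : List Int) (st : List Int × Int) (idx : Int) : List Int × Int :=
  let current_table_idx := PySem.List.pyGetD l idx 0
  let subarea_numbers := st.1 ++ [st.2]
  if idx = PySem.List.pyGetD (PySem.List.pyRange 0 (l.length : Int) 1) (-1) 0 then
    (subarea_numbers, st.2 + 1)
  else if current_table_idx = PySem.List.pyGetD l (idx + 1) 0 then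
    (subarea_numbers, st.2 + 1)
  else
    (subarea_numbers, 1)

def calculate_subarea_numbers (list_table_idx : List Int) : List Int :=
  let nTables : Int := (list_table_idx.length : Int)
  let indices := PySem.List.pyRange 0 nTables 1
  (indices.foldl (stepA list_table_idx) ([], 1)).1

-- ===== PORT B =====
def calculate_subarea_numbers_alt : List Int → List Int
  | [] => []
  | x :: xs =>
    -- inner while loop: length of the maximal run of values equal to the first element
    let k := (xs.takeWhile (fun y => y == x)).length
    (List.range (k + 1)).map (fun i : Nat => (i : Int) + 1) ++ calculate_subarea_numbers_alt (xs.drop k)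
termination_by l => l.length
decreasing_by simp

-- ===== PRECONDITION & SPEC =====
def Spec_calculate_subarea_numbers (list_table_idx : List Int) (out : List Int) : Prop := out = calculate_subarea_numbers_alt list_table_idx
instance (list_table_idx : List Int) (out : List Int) : Decidable (Spec_calculate_subarea_numbers list_table_idx out) := by unfold Spec_calculate_subarea_numbers; infer_instance

-- ===== CLAIM (what is proved, stated in full; the proofs are below) =====
def Claim_equal_calculate_subarea_numbers : Prop := ∀ (list_table_idx : List Int), Dom_calculate_subarea_numbers list_table_idx → Spec_calculate_subarea_numbers list_table_idx (calculate_subarea_numbers list_table_idx)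

-- ===== LEMMAS AND PROOFS =====

-- reference recursion: A's pass written structurally (c = current counter value)
def fA : List Int → Int → List Int
  | [], _ => []
  | [_], c => [c]
  | x :: y :: rest, c => c :: fA (y :: rest) (if x = y then c + 1 else 1)

lemma idx_last (n : Int) (h : 0 < n) :
    PySem.List.pyGetD (PySem.List.pyRange 0 n 1) (-1) 0 = n - 1 := by
  rw [PySem.List.pyGetD_neg_ofNat _ 1 0 (by omega)
        (by simp [PySem.List.length_pyRange_one]; omega)]
  rw [PySem.List.getElem_pyRange_one]
  simp [PySem.List.length_pyRange_one]
  omega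

lemma loopA (l : List Int) (k : Nat) (acc : List Int) (c : Int) :
    ((PySem.List.pyRange (k : Int) (l.length : Int) 1).foldl (stepA l) (acc, c)).1
      = acc ++ fA (l.drop k) c := by
  by_cases h : k < l.length
  · rw [PySem.List.pyRange_one_cons (by exact_mod_cast h)]
    have hx : PySem.List.pyGetD l (k : Int) 0 = l[k] := by
      rw [PySem.List.pyGetD_natCast]
      simp [List.getD_eq_getElem, h]
    by_cases hlast : k = l.length - 1
    · -- last iteration
      have hk1 : k + 1 = l.length := by omega
      have hdrop : l.drop k = [l[k]] := by
        rw [List.drop_eq_getElem_cons h]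
        simp [show k + 1 = l.length from hk1]
      rw [List.foldl_cons]
      have hstep : stepA l (acc, c) (k : Int) = (acc ++ [c], c + 1) := by
        simp only [stepA, idx_last (l.length : Int) (by exact_mod_cast Nat.pos_of_ne_zero (by omega))]
        rw [if_pos (by omega)]
      rw [hstep]
      have := loopA l (k + 1) (acc ++ [c]) (c + 1)
      rw [show ((k : Int) + 1) = ((k + 1 : Nat) : Int) by push_cast; ring, this]
      simp [hk1, hdrop, fA]
    · -- not last: k + 1 < l.length
      have hk1 : k + 1 < l.length := by omega
      have hy : PySem.List.pyGetD l ((k : Int) + 1) 0 = l[k + 1] := by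
        rw [show ((k : Int) + 1) = ((k + 1 : Nat) : Int) by push_cast; ring]
        rw [PySem.List.pyGetD_natCast]
        simp [List.getD_eq_getElem, hk1]
      have hdrop : l.drop k = l[k] :: l[k + 1] :: l.drop (k + 2) := by
        rw [List.drop_eq_getElem_cons h, List.drop_eq_getElem_cons hk1]
      rw [List.foldl_cons]
      have hstep : stepA l (acc, c) (k : Int)
          = (acc ++ [c], if l[k] = l[k + 1] then c + 1 else 1) := by
        simp only [stepA, hx, hy,
          idx_last (l.length : Int) (by exact_mod_cast Nat.pos_of_ne_zero (by omega))]
        rw [if_neg (by omega)]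
        split_ifs <;> rfl
      rw [hstep]
      have := loopA l (k + 1) (acc ++ [c]) (if l[k] = l[k + 1] then c + 1 else 1)
      rw [show ((k : Int) + 1) = ((k + 1 : Nat) : Int) by push_cast; ring, this]
      rw [hdrop, List.drop_eq_getElem_cons hk1]
      simp [fA]
  · rw [PySem.List.pyRange_one_eq_nil (by exact_mod_cast Nat.le_of_not_lt h)]
    simp [List.drop_eq_nil_of_le (Nat.le_of_not_lt h), fA]
termination_by l.length - k

lemma range_map_shift (n : Nat) (c : Int) :
    (List.range (n + 1)).map (fun i : Nat => (i : Int) + c)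
      = c :: (List.range n).map (fun i : Nat => (i : Int) + (c + 1)) := by
  induction n generalizing c with
  | zero => simp
  | succ n ih =>
    rw [List.range_succ, List.map_append, ih]
    conv_rhs => rw [List.range_succ, List.map_append]
    simp
    push_cast
    ring

lemma fA_run (xs : List Int) (x : Int) (c : Int) :
    fA (x :: xs) c =
      (List.range ((xs.takeWhile (fun y => y == x)).length + 1)).map (fun i : Nat => (i : Int) + c)
        ++ fA (xs.drop (xs.takeWhile (fun y => y == x)).length) 1 := by
  induction xs generalizing x c with
  | nil => simp [fA]
  | cons y ys ih =>
    by_cases h : y = x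
    · subst h
      have htw : (y :: ys).takeWhile (fun z => z == y) = y :: ys.takeWhile (fun z => z == y) := by
        simp
      rw [htw]
      simp only [List.length_cons, List.drop_succ_cons]
      rw [range_map_shift]
      show c :: fA (y :: ys) (if y = y then c + 1 else 1) = _
      rw [if_pos rfl, ih y (c + 1)]
      simp
    · have htw : (y :: ys).takeWhile (fun z => z == x) = [] := by
        simp [h]
      rw [htw]
      show c :: fA (y :: ys) (if x = y then c + 1 else 1) = _
      rw [if_neg (fun hxy => h hxy.symm)]
      simp [List.range_succ]

lemma alt_eq_fA (l : List Int) : calculate_subarea_numbers_alt l = fA l 1 := by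
  fun_induction calculate_subarea_numbers_alt l with
  | case1 => simp [fA]
  | case2 x xs k ih =>
    rw [ih, fA_run]

-- ===== VERDICT (by name: the statement is the Claim_ definition above) =====
theorem calculate_subarea_numbers_spec : Claim_equal_calculate_subarea_numbers := by
  intro l _
  unfold Spec_calculate_subarea_numbers calculate_subarea_numbers
  have := loopA l 0 [] 1
  simp only [Nat.cast_zero, List.drop_zero, List.nil_append] at this
  rw [this, alt_eq_fA]
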